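-- pv_equiv track=rewrite | github.com/corrin/jobs_manager | scripts/generate_url_docs.py | _group_urls_by_category
-- ===== SOURCE A (Python) =====
-- from typing import Any, Dict, List, Optional
--
-- def _group_urls_by_category(
--     urls: List[Dict[str, Any]]
-- ) -> Dict[str, List[Dict[str, Any]]]:
--     """Group URLs by category."""
--     grouped = {}
--
--     for url in urls:
--         category = url["category"]
--         if category not in grouped:
--             grouped[category] = []
--         grouped[category].append(url)
--
--     # Sort within each category by pattern
--     for category in grouped:
--         grouped[category].sort(key=lambda x: x["pattern"])
--
--     return grouped
-- ===== SOURCE B (Python) =====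
-- from typing import Any, Dict, List
--
--
-- def _group_urls_by_category(
--     urls: List[Dict[str, Any]]
-- ) -> Dict[str, List[Dict[str, Any]]]:
--     """Group URLs by category: list the distinct categories once (first-encounter
--     order), then build each bucket directly as a sorted filter of the input."""
--     categories = list(dict.fromkeys(u["category"] for u in urls))
--     return {
--         c: sorted((u for u in urls if u["category"] == c),
--                   key=lambda x: x["pattern"])
--         for c in categories
--     }
-- ===== Notes on version B (the rewrite author's own statement) =====
-- stated objective: alternative
-- what changed: Instead of incrementally mutating a dict (conditional setdefault + append per url, then an in-place sort per bucket), B first lists the distinct categories in first-encounter order and then builds the result in one comprehension, each bucket a sorted filter of the input; no mutation at all.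
import Mathlib
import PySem

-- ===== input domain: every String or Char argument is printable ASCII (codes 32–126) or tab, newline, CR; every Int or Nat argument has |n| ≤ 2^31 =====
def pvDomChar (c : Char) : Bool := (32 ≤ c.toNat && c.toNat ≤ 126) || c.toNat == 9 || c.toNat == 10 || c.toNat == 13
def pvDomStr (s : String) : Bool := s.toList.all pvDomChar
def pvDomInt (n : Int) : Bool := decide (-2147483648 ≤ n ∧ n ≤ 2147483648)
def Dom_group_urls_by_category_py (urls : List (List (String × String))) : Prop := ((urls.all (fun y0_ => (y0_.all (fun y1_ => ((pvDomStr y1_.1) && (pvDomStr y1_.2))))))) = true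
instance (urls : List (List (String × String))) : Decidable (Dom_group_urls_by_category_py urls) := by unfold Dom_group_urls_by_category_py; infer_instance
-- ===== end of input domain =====

-- B's change: list the distinct categories once, then build each bucket as a sorted
-- filter of the input (no dict mutation), instead of A's incremental dict building
-- with per-bucket in-place sorts (same return value; neither version mutates `urls`).

-- a url dict's "category" / "pattern" value (first match; default "" never reached under Pre_)
def pvCat (u : List (String × String)) : String := (PySem.Dict.mk u).getD "category" ""
def pvPat (u : List (String × String)) : String := (PySem.Dict.mk u).getD "pattern" ""

-- ===== PORT A =====
def group_urls_by_category_py (urls : List (List (String × String))) : List (String × List (List (String × String))) :=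
  -- grouped = {}; for url in urls: if category not in grouped: grouped[category] = []; grouped[category].append(url)
  let grouped : PySem.Dict String (List (List (String × String))) :=
    urls.foldl (fun g url =>
      let category := pvCat url
      let g := if g.contains category then g else g.insert category []
      g.modify category [] (fun v => v ++ [url])) PySem.Dict.empty
  -- for category in grouped: grouped[category].sort(key=lambda x: x["pattern"]); return grouped
  grouped.items.map (fun p => (p.1, PySem.List.sorted p.2 pvPat))

-- ===== PORT B =====
def group_urls_by_category_py_alt (urls : List (List (String × String))) : List (String × List (List (String × String))) :=
  -- categories = list(dict.fromkeys(u["category"] for u in urls))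
  let categories := PySem.List.dedup (urls.map pvCat)
  -- {c: sorted((u for u in urls if u["category"] == c), key=lambda x: x["pattern"]) for c in categories}
  categories.map (fun c => (c, PySem.List.sorted (urls.filter (fun u => pvCat u == c)) pvPat))

-- ===== PRECONDITION & SPEC =====
-- Pre_ excludes exactly the inputs where the Python A raises KeyError: a url missing
-- the "category" or the "pattern" key.
def Pre_group_urls_by_category_py (urls : List (List (String × String))) : Prop :=
  ∀ u ∈ urls, (PySem.Dict.mk u).contains "category" = true ∧ (PySem.Dict.mk u).contains "pattern" = true
instance (urls : List (List (String × String))) : Decidable (Pre_group_urls_by_category_py urls) := by unfold Pre_group_urls_by_category_py; infer_instance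

def pvWitness_group_urls_by_category_py : (List (List (String × String))) :=
  [[("category", "jobs"), ("pattern", "jobs/<id>")], [("category", "auth"), ("pattern", "login/")]]

def Spec_group_urls_by_category_py (urls : List (List (String × String))) (out : List (String × List (List (String × String)))) : Prop := out = group_urls_by_category_py_alt urls
instance (urls : List (List (String × String))) (out : List (String × List (List (String × String)))) : Decidable (Spec_group_urls_by_category_py urls out) := by unfold Spec_group_urls_by_category_py; infer_instance

-- ===== CLAIM (what is proved, stated in full; the proofs are below) =====
def Claim_equal_group_urls_by_category_py : Prop := ∀ (urls : List (List (String × String))), Dom_group_urls_by_category_py urls → Pre_group_urls_by_category_py urls → Spec_group_urls_by_category_py urls (group_urls_by_category_py urls)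

-- ===== LEMMAS AND PROOFS =====

-- A's loop body (conditional setdefault, then append) is a single modify-with-default
lemma stepA_eq (g : PySem.Dict String (List (List (String × String)))) (url : List (String × String)) :
    (let category := pvCat url
     let g := if g.contains category then g else g.insert category []
     g.modify category [] (fun v => v ++ [url])) =
    g.modify (pvCat url) [] (fun v => v ++ [url]) := by
  by_cases hc : g.contains (pvCat url) = true
  · simp [hc]
  · simp only [Bool.not_eq_true] at hc
    simp only [hc, Bool.false_eq_true, if_false, PySem.Dict.modify,
      PySem.Dict.getD_insert_self, PySem.Dict.insert_insert_self,
      PySem.Dict.getD_of_not_contains g _ hc]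

-- the value A's final dict holds at key c: the urls of that category, in input order
lemma getD_foldl_modify_cat (xs : List (List (String × String)))
    (g : PySem.Dict String (List (List (String × String)))) (c : String) :
    (xs.foldl (fun g u => g.modify (pvCat u) [] (fun v => v ++ [u])) g).getD c [] =
      g.getD c [] ++ xs.filter (fun u => pvCat u == c) := by
  have h := PySem.Dict.getD_foldl_modify_append (xs.map (fun u => (pvCat u, u))) g c
  rw [List.foldl_map] at h
  rw [h]
  simp [List.filter_map, Function.comp_def]

-- ===== VERDICT (by name: the statement is the Claim_ definition above) =====
theorem group_urls_by_category_py_spec : Claim_equal_group_urls_by_category_py := by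
  intro urls _ _
  unfold Spec_group_urls_by_category_py group_urls_by_category_py group_urls_by_category_py_alt
  dsimp only
  -- rewrite A's loop body into a bare modify fold
  rw [PySem.List.foldl_congr_mem urls _ (fun g u => g.modify (pvCat u) [] (fun v => v ++ [u]))
        PySem.Dict.empty (fun acc x _ => stepA_eq acc x)]
  set M := urls.foldl (fun g u => g.modify (pvCat u) [] (fun v => v ++ [u])) PySem.Dict.empty with hM
  have hMkeys : M.keys = PySem.Set.ofList (urls.map pvCat) := by
    rw [hM, PySem.Dict.keys_foldl_modify_key urls pvCat [] (fun _ u => fun v => v ++ [u])]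
    rfl
  have hMnd : M.keys.Nodup := by
    rw [hM]
    exact PySem.Dict.nodup_keys_foldl_modify_key urls pvCat [] _ _ (by simp)
  rw [PySem.Dict.items_eq_map_keys M hMnd [], hMkeys, List.map_map, PySem.List.dedup_eq_ofList]
  apply List.map_congr_left
  intro c _
  simp only [Function.comp_apply]
  refine congrArg (Prod.mk c) ?_
  refine congrArg (fun l => PySem.List.sorted l pvPat) ?_
  rw [hM, getD_foldl_modify_cat]
  simp
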